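-- pv_equiv track=rewrite | github.com/bbugyi200/dotfiles | home/lib/gai/src/ace/hints.py | is_rerun_input
-- ===== SOURCE A (Python) =====
-- def _is_valid_hint_part(part: str) -> bool:
--     """Check if a hint part is valid (single number or range).
--
--     Args:
--         part: A string like "5" or "1-10"
--
--     Returns:
--         True if the part is a valid hint (number or range)
--     """
--     if "-" in part and not part.startswith("-"):
--         # Range format: check both parts are digits
--         range_parts = part.split("-", 1)
--         if len(range_parts) != 2:
--             return False
--         return range_parts[0].isdigit() and range_parts[1].isdigit()
--     else:
--         return part.isdigit()
--
-- def is_rerun_input(user_input: str) -> bool: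
--     """Check if user input is a rerun/delete command (list of integers/ranges with optional suffix).
--
--     Suffixes:
--         - No suffix: rerun the hook (clear status for last history entry)
--         - '@' suffix: delete the hook entirely
--
--     Args:
--         user_input: The user's input string
--
--     Returns:
--         True if input looks like a rerun command (e.g., "1 2 3", "1@", "2@ 3", "1-5")
--     """
--     if not user_input:
--         return False
--
--     for part in user_input.split():
--         # Reject '@@' suffix (no longer supported)
--         if part.endswith("@@"):
--             return False
--         # Strip optional '@' suffix
--         part_stripped = part.rstrip("@")
--         # Check if it's a valid integer or range
--         if not _is_valid_hint_part(part_stripped):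
--             return False
--
--     return True
-- ===== SOURCE B (Python) =====
-- def is_rerun_input(user_input: str) -> bool:
--     """Single left-to-right pass: a 6-state DFA over the characters.
--
--     States: 0 = between tokens, 1 = in first number, 2 = just after '-',
--     3 = in second number, 4 = after '@' suffix, 5 = dead (invalid).
--     """
--     state = 0
--     for ch in user_input:
--         if state == 0:
--             state = 0 if ch.isspace() else 1 if ch.isdigit() else 5
--         elif state == 1:
--             state = (1 if ch.isdigit() else 2 if ch == "-" else
--                      4 if ch == "@" else 0 if ch.isspace() else 5)
--         elif state == 2:
--             state = 3 if ch.isdigit() else 5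
--         elif state == 3:
--             state = (3 if ch.isdigit() else 4 if ch == "@" else
--                      0 if ch.isspace() else 5)
--         elif state == 4:
--             state = 0 if ch.isspace() else 5
--         else:
--             break
--     return bool(user_input) and state in (0, 1, 3, 4)
-- ===== Notes on version B (the rewrite author's own statement) =====
-- stated objective: alternative
-- what changed: Replaces split()-into-tokens plus per-token endswith/rstrip/substring-split checks by a single left-to-right pass of a 6-state finite automaton over the characters, with no intermediate token lists or string surgery.
import Mathlib
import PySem

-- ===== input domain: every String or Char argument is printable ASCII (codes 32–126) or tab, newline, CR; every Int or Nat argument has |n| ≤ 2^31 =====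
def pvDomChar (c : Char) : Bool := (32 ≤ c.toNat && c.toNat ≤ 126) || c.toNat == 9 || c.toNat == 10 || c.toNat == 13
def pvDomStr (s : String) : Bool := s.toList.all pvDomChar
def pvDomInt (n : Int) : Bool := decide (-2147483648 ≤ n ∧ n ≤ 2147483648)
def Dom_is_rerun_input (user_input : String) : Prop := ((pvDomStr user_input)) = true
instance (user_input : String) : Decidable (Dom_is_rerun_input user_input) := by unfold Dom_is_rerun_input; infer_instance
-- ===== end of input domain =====

-- B replaces split()+per-token string surgery by one pass of a 6-state character automaton (alternative algorithm, same asymptotic cost).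

-- ===== PORT A =====
-- part.rstrip("@"): PySem has no rstrip-with-chars, ported by hand (exact: drops the maximal trailing run of '@')
def pvRstripAt (cs : List Char) : List Char := (cs.reverse.dropWhile (· == '@')).reverse

def _is_valid_hint_part (part : List Char) : Bool :=
  if PySem.Chars.isIn ['-'] part && !(PySem.Chars.startswith part ['-']) then
    -- range format: part.split("-", 1), both pieces must be digits
    let range_parts := PySem.Chars.splitOnMax part ['-'] 1
    if range_parts.length ≠ 2 then false
    else PySem.Chars.strIsdigit (range_parts.getD 0 []) && PySem.Chars.strIsdigit (range_parts.getD 1 [])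
  else PySem.Chars.strIsdigit part

def is_rerun_input (user_input : String) : Bool :=
  if user_input.toList.isEmpty then false
  else
    (PySem.Chars.split₀ user_input.toList).all fun part =>
      if PySem.Chars.endswith part ['@', '@'] then false
      else _is_valid_hint_part (pvRstripAt part)

-- ===== PORT B =====
inductive RerunState where
  | between | num1 | dash | num2 | suffix | dead
deriving DecidableEq, Repr

def rerunStep (s : RerunState) (c : Char) : RerunState :=
  match s with
  | .between => if PySem.Chars.isspace c then .between else if PySem.Chars.isdigit c then .num1 else .dead
  | .num1 => if PySem.Chars.isdigit c then .num1 else if c == '-' then .dash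
             else if c == '@' then .suffix else if PySem.Chars.isspace c then .between else .dead
  | .dash => if PySem.Chars.isdigit c then .num2 else .dead
  | .num2 => if PySem.Chars.isdigit c then .num2 else if c == '@' then .suffix
             else if PySem.Chars.isspace c then .between else .dead
  | .suffix => if PySem.Chars.isspace c then .between else .dead
  | .dead => .dead

def rerunAccept (s : RerunState) : Bool :=
  match s with
  | .dash | .dead => false
  | _ => true

def is_rerun_input_alt (user_input : String) : Bool :=
  !user_input.toList.isEmpty && rerunAccept (user_input.toList.foldl rerunStep .between)

-- ===== PRECONDITION & SPEC =====
def Spec_is_rerun_input (user_input : String) (out : Bool) : Prop := out = is_rerun_input_alt user_input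
instance (user_input : String) (out : Bool) : Decidable (Spec_is_rerun_input user_input out) := by unfold Spec_is_rerun_input; infer_instance

-- ===== CLAIM (what is proved, stated in full; the proofs are below) =====
def Claim_equal_is_rerun_input : Prop := ∀ (user_input : String), Dom_is_rerun_input user_input → Spec_is_rerun_input user_input (is_rerun_input user_input)

-- ===== LEMMAS AND PROOFS =====

-- the per-token check of A's loop body
def pvOk (part : List Char) : Bool :=
  if PySem.Chars.endswith part ['@', '@'] then false
  else _is_valid_hint_part (pvRstripAt part)

-- acceptance of a DFA state in the middle of the input (a finished, nonempty token)
def pvTokA (s : RerunState) : Bool :=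
  match s with
  | .num1 | .num2 | .suffix => true
  | _ => false

-- ---- character-class facts ----

lemma pv_digit_toNat {c : Char} (h : PySem.Chars.isdigit c = true) :
    48 ≤ c.toNat ∧ c.toNat ≤ 57 := by
  simp [PySem.Chars.isdigit] at h
  obtain ⟨h1, h2⟩ := h
  rw [Char.le_def] at h1 h2
  rw [UInt32.le_iff_toNat_le] at h1 h2
  exact ⟨h1, h2⟩

lemma pv_digit_not_space {c : Char} (h : PySem.Chars.isdigit c = true) :
    PySem.Chars.isspace c = false := by
  obtain ⟨h1, h2⟩ := pv_digit_toNat h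
  simp [PySem.Chars.isspace]
  omega

lemma pv_digit_ne_at {c : Char} (h : PySem.Chars.isdigit c = true) : c ≠ '@' := by
  intro hc; subst hc; simp [PySem.Chars.isdigit] at h

lemma pv_space_ne_dash {c : Char} (h : PySem.Chars.isspace c = true) : c ≠ '-' := by
  rintro rfl; exact absurd h (by decide)

lemma pv_space_ne_at {c : Char} (h : PySem.Chars.isspace c = true) : c ≠ '@' := by
  rintro rfl; exact absurd h (by decide)

lemma pv_space_not_digit {c : Char} (h : PySem.Chars.isspace c = true) :
    PySem.Chars.isdigit c = false := by
  by_contra hd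
  simp only [Bool.not_eq_false] at hd
  rw [pv_digit_not_space hd] at h
  exact absurd h (by simp)

-- ---- unfolding equations for split₀.go / splitOnMax.go ----

lemma pv_split_go_nil (cur : List Char) (acc : List (List Char)) :
    PySem.Chars.split₀.go [] cur acc =
      if cur.isEmpty then acc.reverse else (cur.reverse :: acc).reverse := by
  rw [PySem.Chars.split₀.go.eq_def]

lemma pv_split_go_cons (c : Char) (rest cur : List Char) (acc : List (List Char)) :
    PySem.Chars.split₀.go (c :: rest) cur acc =
      if PySem.Chars.isspace c then
        (if cur.isEmpty then PySem.Chars.split₀.go rest [] acc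
         else PySem.Chars.split₀.go rest [] (cur.reverse :: acc))
      else PySem.Chars.split₀.go rest (c :: cur) acc := by
  rw [PySem.Chars.split₀.go.eq_def]

lemma pv_split_go_acc (l : List Char) : ∀ (cur : List Char) (acc : List (List Char)),
    PySem.Chars.split₀.go l cur acc = acc.reverse ++ PySem.Chars.split₀.go l cur [] := by
  induction l with
  | nil =>
      intro cur acc
      rw [pv_split_go_nil, pv_split_go_nil]
      by_cases h : cur.isEmpty <;> simp [h]
  | cons c rest ih =>
      intro cur acc
      rw [pv_split_go_cons, pv_split_go_cons]
      by_cases hs : PySem.Chars.isspace c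
      · by_cases hc : cur.isEmpty
        · simp only [hs, hc, if_true]
          exact ih [] acc
        · simp only [hs, hc, if_true, if_false]
          rw [ih [] (cur.reverse :: acc), ih [] [cur.reverse]]
          simp
      · simp only [hs, if_false]
        exact ih (c :: cur) acc

lemma pv_smax_go_zero (f : Nat) (l cur : List Char) (acc : List (List Char)) :
    PySem.Chars.splitOnMax.go ['-'] f 0 l cur acc = ((cur.reverse ++ l) :: acc).reverse := by
  rw [PySem.Chars.splitOnMax.go.eq_def]
  cases f <;> cases l <;> simp

lemma pv_smax_go_one : ∀ (fuel : Nat) (l cur : List Char) (acc : List (List Char)),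
    l.length < fuel →
    PySem.Chars.splitOnMax.go ['-'] fuel 1 l cur acc =
      if '-' ∈ l then
        acc.reverse ++ [cur.reverse ++ l.takeWhile (· != '-'), (l.dropWhile (· != '-')).tail]
      else acc.reverse ++ [cur.reverse ++ l] := by
  intro fuel
  induction fuel with
  | zero => intro l cur acc h; omega
  | succ f ih =>
      intro l cur acc h
      rw [PySem.Chars.splitOnMax.go.eq_def]
      cases l with
      | nil => simp
      | cons c rest =>
          simp only [List.length_cons] at h
          by_cases hc : c = '-'
          · subst hc
            have hpre : ['-'].isPrefixOf ('-' :: rest) = true := by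
              simp [List.isPrefixOf]
            simp only [hpre, if_true, Nat.succ_ne_zero, if_false]
            rw [pv_smax_go_zero]
            simp [List.takeWhile, List.dropWhile]
          · have hpre : ['-'].isPrefixOf (c :: rest) = false := by
              simp [List.isPrefixOf]
              exact fun h' => absurd h'.symm hc
            simp only [hpre, Nat.succ_ne_zero, if_false, Bool.false_eq_true]
            rw [ih rest (c :: cur) acc (by omega)]
            have hne : (c != '-') = true := by simp [hc]
            have hc' : ¬ '-' = c := fun h' => hc h'.symm
            by_cases hm : '-' ∈ rest
            · simp [hm, hc', List.takeWhile, List.dropWhile, hne]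
            · simp [hm, hc', hne]

lemma pv_smax_top (l : List Char) :
    PySem.Chars.splitOnMax l ['-'] 1 =
      if '-' ∈ l then [l.takeWhile (· != '-'), (l.dropWhile (· != '-')).tail]
      else [l] := by
  rw [PySem.Chars.splitOnMax]
  norm_num
  rw [pv_smax_go_one (l.length + 1) l [] [] (by omega)]
  by_cases hm : '-' ∈ l <;> simp [hm]

lemma pv_tw_shape : ∀ (d e : List Char), '-' ∉ d →
    (d ++ '-' :: e).takeWhile (· != '-') = d := by
  intro d
  induction d with
  | nil => intro e _; simp [List.takeWhile_cons]
  | cons a d' ihd =>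
      intro e hd
      have ha : a ≠ '-' := fun h => hd (by simp [h])
      have ha' : (a != '-') = true := by simp [ha]
      simp only [List.cons_append, List.takeWhile_cons, ha', if_true]
      rw [ihd e (fun h => hd (List.mem_cons_of_mem _ h))]

lemma pv_dw_shape : ∀ (d e : List Char), '-' ∉ d →
    (d ++ '-' :: e).dropWhile (· != '-') = '-' :: e := by
  intro d
  induction d with
  | nil => intro e _; simp [List.dropWhile_cons]
  | cons a d' ihd =>
      intro e hd
      have ha : a ≠ '-' := fun h => hd (by simp [h])
      have ha' : (a != '-') = true := by simp [ha]
      simp only [List.cons_append, List.dropWhile_cons, ha', if_true]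
      exact ihd e (fun h => hd (List.mem_cons_of_mem _ h))

lemma pv_split_shape (d e : List Char) (hd : '-' ∉ d) :
    PySem.Chars.splitOnMax (d ++ '-' :: e) ['-'] 1 = [d, e] := by
  rw [pv_smax_top]
  have hm : '-' ∈ d ++ '-' :: e := by simp
  simp only [hm, if_true]
  rw [pv_tw_shape d e hd, pv_dw_shape d e hd]
  rfl

lemma pv_dash_decomp : ∀ (l : List Char), '-' ∈ l →
    ∃ d e, l = d ++ '-' :: e ∧ '-' ∉ d := by
  intro l
  induction l with
  | nil => intro h; simp at h
  | cons c rest ih =>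
      intro h
      by_cases hc : c = '-'
      · exact ⟨[], rest, by simp [hc], by simp⟩
      · have : '-' ∈ rest := by
          rcases List.mem_cons.mp h with h1 | h1
          · exact absurd h1.symm hc
          · exact h1
        obtain ⟨d, e, h1, h2⟩ := ih this
        refine ⟨c :: d, e, by simp [h1], ?_⟩
        simp only [List.mem_cons, not_or]
        exact ⟨fun h' => hc h'.symm, h2⟩

lemma pv_mem_isIn (x : Char) (l : List Char) : PySem.Chars.isIn [x] l = true ↔ x ∈ l := by
  rw [PySem.Chars.isIn_iff_infix]
  constructor
  · intro h
    exact (List.singleton_sublist).mp h.sublist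
  · intro h
    obtain ⟨s, t, hst⟩ := List.append_of_mem h
    exact ⟨s, t, by simp [hst]⟩

-- ---- facts about A's validity check ----

lemma pv_strIsdigit_true (l : List Char) (h0 : l ≠ []) (h1 : l.all PySem.Chars.isdigit = true) :
    PySem.Chars.strIsdigit l = true := by
  unfold PySem.Chars.strIsdigit
  have : l.isEmpty = false := by simp [List.isEmpty_iff, h0]
  simp [this, h1]

lemma pv_strIsdigit_false_of_mem (l : List Char) (x : Char) (hx : x ∈ l)
    (hxd : PySem.Chars.isdigit x = false) : PySem.Chars.strIsdigit l = false := by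
  unfold PySem.Chars.strIsdigit
  have : l.all PySem.Chars.isdigit = false := by
    rw [← Bool.not_eq_true]
    intro hall
    have := List.all_eq_true.mp hall _ hx
    rw [hxd] at this
    exact absurd this (by simp)
  simp [this]

lemma pv_valid_digits (d : List Char) (h0 : d ≠ []) (h1 : d.all PySem.Chars.isdigit = true) :
    _is_valid_hint_part d = true := by
  unfold _is_valid_hint_part
  have hni : PySem.Chars.isIn ['-'] d = false := by
    by_contra hb
    simp only [Bool.not_eq_false] at hb
    have hm := (pv_mem_isIn _ _).mp hb
    have := List.all_eq_true.mp h1 _ hm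
    exact absurd this (by decide)
  simp only [hni, Bool.false_and, Bool.false_eq_true, if_false]
  exact pv_strIsdigit_true d h0 h1

lemma pv_startswith_dash_false (d e : List Char) (h0 : d ≠ [])
    (hnd : '-' ∉ d) : PySem.Chars.startswith (d ++ '-' :: e) ['-'] = false := by
  cases d with
  | nil => exact absurd rfl h0
  | cons a d' =>
      have ha : a ≠ '-' := fun h => hnd (by simp [h])
      simp [PySem.Chars.startswith, List.isPrefixOf]
      exact fun h => ha h.symm

lemma pv_valid_range_shape (d e : List Char) (h0 : d ≠ []) (hnd : '-' ∉ d)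
    (hsd : PySem.Chars.strIsdigit d = true) :
    _is_valid_hint_part (d ++ '-' :: e) = PySem.Chars.strIsdigit e := by
  unfold _is_valid_hint_part
  have hmem : PySem.Chars.isIn ['-'] (d ++ '-' :: e) = true := (pv_mem_isIn _ _).mpr (by simp)
  have hsw := pv_startswith_dash_false d e h0 hnd
  simp only [hmem, hsw, Bool.not_false, Bool.and_true, if_true]
  rw [pv_split_shape d e hnd]
  simp [hsd]

lemma pv_valid_range (d e : List Char) (h0 : d ≠ []) (h1 : d.all PySem.Chars.isdigit = true) :
    _is_valid_hint_part (d ++ '-' :: e) = PySem.Chars.strIsdigit e := by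
  have hnd : '-' ∉ d := by
    intro hm
    have := List.all_eq_true.mp h1 _ hm
    exact absurd this (by decide)
  exact pv_valid_range_shape d e h0 hnd (pv_strIsdigit_true d h0 h1)

lemma pv_valid_headbad (c : Char) (u : List Char) (hc : PySem.Chars.isdigit c = false) :
    _is_valid_hint_part (c :: u) = false := by
  by_cases hcd : c = '-'
  · subst hcd
    unfold _is_valid_hint_part
    have hsw : PySem.Chars.startswith ('-' :: u) ['-'] = true := by
      simp [PySem.Chars.startswith, List.isPrefixOf]
    simp only [hsw, Bool.not_true, Bool.and_false, Bool.false_eq_true, if_false]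
    exact pv_strIsdigit_false_of_mem _ '-' (by simp) (by decide)
  · by_cases hdash : '-' ∈ c :: u
    · obtain ⟨d, e, hde, hnd⟩ := pv_dash_decomp _ hdash
      have hd0 : d ≠ [] := by
        intro h; rw [h] at hde; simp at hde; exact hcd hde.1
      have hcmem : c ∈ d := by
        cases d with
        | nil => exact absurd rfl hd0
        | cons a d' => simp at hde; simp [hde.1]
      rw [hde]
      unfold _is_valid_hint_part
      have hmem : PySem.Chars.isIn ['-'] (d ++ '-' :: e) = true := (pv_mem_isIn _ _).mpr (by simp)
      have hsw := pv_startswith_dash_false d e hd0 hnd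
      simp only [hmem, hsw, Bool.not_false, Bool.and_true, if_true]
      rw [pv_split_shape d e hnd]
      simp [pv_strIsdigit_false_of_mem d c hcmem hc]
    · unfold _is_valid_hint_part
      have hni : PySem.Chars.isIn ['-'] (c :: u) = false := by
        rw [← Bool.not_eq_true, pv_mem_isIn]; exact hdash
      simp only [hni, Bool.false_and, Bool.false_eq_true, if_false]
      exact pv_strIsdigit_false_of_mem _ c (by simp) hc

lemma pv_valid_nondigit_mem (t : List Char) (x : Char) (hx : x ∈ t)
    (hxd : PySem.Chars.isdigit x = false) (hxdash : x ≠ '-') :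
    _is_valid_hint_part t = false := by
  by_cases hdash : '-' ∈ t
  · obtain ⟨d, e, hde, hnd⟩ := pv_dash_decomp _ hdash
    subst hde
    unfold _is_valid_hint_part
    have hmem : PySem.Chars.isIn ['-'] (d ++ '-' :: e) = true := (pv_mem_isIn _ _).mpr (by simp)
    by_cases hsw : PySem.Chars.startswith (d ++ '-' :: e) ['-'] = true
    · simp only [hsw, Bool.not_true, Bool.and_false, Bool.false_eq_true, if_false]
      exact pv_strIsdigit_false_of_mem _ '-' (by simp) (by decide)
    · rw [Bool.not_eq_true] at hsw
      simp only [hmem, hsw, Bool.not_false, Bool.and_true, if_true]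
      rw [pv_split_shape d e hnd]
      have hx' : x ∈ d ∨ x ∈ e := by
        rcases List.mem_append.mp hx with h | h
        · exact Or.inl h
        · rcases List.mem_cons.mp h with h1 | h1
          · exact absurd h1 hxdash
          · exact Or.inr h1
      rcases hx' with h | h
      · simp [pv_strIsdigit_false_of_mem d x h hxd]
      · simp [pv_strIsdigit_false_of_mem e x h hxd]
  · unfold _is_valid_hint_part
    have hni : PySem.Chars.isIn ['-'] t = false := by
      rw [← Bool.not_eq_true, pv_mem_isIn]; exact hdash
    simp only [hni, Bool.false_and, Bool.false_eq_true, if_false]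
    exact pv_strIsdigit_false_of_mem _ x hx hxd

-- ---- facts about pvRstripAt ----

lemma pv_rs_all (x y : List Char) (h : y.all (· == '@') = true) :
    pvRstripAt (x ++ y) = pvRstripAt x := by
  unfold pvRstripAt
  rw [List.reverse_append, List.dropWhile_append]
  have : y.reverse.dropWhile (· == '@') = [] := by
    rw [List.dropWhile_eq_nil_iff]
    intro a ha
    exact List.all_eq_true.mp h a (List.mem_reverse.mp ha)
  simp [this]

lemma pv_rs_split (x y : List Char) (h : ¬ (y.all (· == '@') = true)) :
    pvRstripAt (x ++ y) = x ++ pvRstripAt y := by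
  unfold pvRstripAt
  rw [List.reverse_append, List.dropWhile_append]
  have : ¬ (y.reverse.dropWhile (· == '@') = []) := by
    rw [List.dropWhile_eq_nil_iff]
    intro hall
    exact h (List.all_eq_true.mpr (fun a ha => hall a (List.mem_reverse.mpr ha)))
  rw [if_neg (by simpa [List.isEmpty_iff] using this)]
  simp

lemma pv_rs_nil_iff (t : List Char) : pvRstripAt t = [] ↔ t.all (· == '@') = true := by
  unfold pvRstripAt
  rw [List.reverse_eq_nil_iff, List.dropWhile_eq_nil_iff]
  constructor
  · intro h
    exact List.all_eq_true.mpr (fun a ha => h a (List.mem_reverse.mpr ha))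
  · intro h a ha
    exact List.all_eq_true.mp h a (List.mem_reverse.mp ha)

lemma pv_rs_prefix (t : List Char) : pvRstripAt t <+: t := by
  unfold pvRstripAt
  obtain ⟨z, hz⟩ := List.dropWhile_suffix (l := t.reverse) (p := (· == '@'))
  exact ⟨z.reverse, by rw [← List.reverse_append, hz, List.reverse_reverse]⟩

lemma pv_rs_head (c : Char) (u : List Char) (h : ¬ ((c :: u).all (· == '@') = true)) :
    ∃ v, pvRstripAt (c :: u) = c :: v := by
  have hne : pvRstripAt (c :: u) ≠ [] := fun h0 => h ((pv_rs_nil_iff _).mp h0)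
  obtain ⟨t', ht⟩ := pv_rs_prefix (c :: u)
  cases hx : pvRstripAt (c :: u) with
  | nil => exact absurd hx hne
  | cons a v =>
      have hx2 : (a :: v) ++ t' = c :: u := by rw [← hx]; exact ht
      have ha : a = c := by
        have := congrArg List.head? hx2
        simpa using this
      exact ⟨v, by rw [ha]⟩

lemma pv_rs_last (z : List Char) (c : Char) (h : c ≠ '@') :
    pvRstripAt (z ++ [c]) = z ++ [c] := by
  unfold pvRstripAt
  rw [List.reverse_append]
  simp [List.dropWhile_cons, h]

-- ---- facts about endswith "@@'' ----

lemma pv_end_mem (t : List Char) (h : PySem.Chars.endswith t ['@', '@'] = true) : '@' ∈ t := by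
  rw [PySem.Chars.endswith_iff] at h
  exact h.subset (by simp)

lemma pv_end_false_of_not_mem (t : List Char) (h : '@' ∉ t) :
    PySem.Chars.endswith t ['@', '@'] = false := by
  by_contra hb
  simp only [Bool.not_eq_false] at hb
  exact h (pv_end_mem t hb)

lemma pv_end_concat_false (w : List Char) (h : '@' ∉ w) :
    PySem.Chars.endswith (w ++ ['@']) ['@', '@'] = false := by
  by_contra hb
  simp only [Bool.not_eq_false] at hb
  rw [PySem.Chars.endswith_iff] at hb
  rw [← List.reverse_prefix] at hb
  simp only [List.reverse_append] at hb
  simp only [List.reverse_cons, List.reverse_nil, List.nil_append,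
    List.singleton_append] at hb
  rw [List.cons_prefix_cons] at hb
  obtain ⟨-, hb⟩ := hb
  have : '@' ∈ w.reverse := hb.subset (by simp)
  exact h (List.mem_reverse.mp this)

lemma pv_end_allat : ∀ (y x : List Char), y ≠ [] → y.all (· == '@') = true →
    PySem.Chars.endswith (x ++ '@' :: y) ['@', '@'] = true := by
  intro y
  induction y with
  | nil => intro x h; exact absurd rfl h
  | cons b y' ih =>
      intro x _ hall
      have hb : b = '@' := by
        have := List.all_eq_true.mp hall b (by simp)
        simpa using this
      subst hb
      cases y' with
      | nil =>
          rw [PySem.Chars.endswith_iff]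
          exact ⟨x, by simp⟩
      | cons b' y'' =>
          have : x ++ '@' :: '@' :: b' :: y'' = (x ++ ['@']) ++ '@' :: (b' :: y'') := by simp
          rw [this]
          apply ih (x ++ ['@']) (by simp)
          rw [List.all_eq_true] at hall ⊢
          intro a ha
          exact hall a (by simp [List.mem_cons.mp ha])

lemma pv_ok_of_valid_false (t : List Char)
    (h : _is_valid_hint_part (pvRstripAt t) = false) : pvOk t = false := by
  unfold pvOk
  by_cases he : PySem.Chars.endswith t ['@', '@'] = true <;> simp [he, h]

-- ---- DFA facts ----

lemma pv_dead_absorb : ∀ (u : List Char), List.foldl rerunStep .dead u = .dead := by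
  intro u
  induction u with
  | nil => rfl
  | cons c u' ih => simp [List.foldl_cons, rerunStep, ih]

lemma pv_nz : ∀ (u : List Char) (s : RerunState),
    u.all (fun c => !PySem.Chars.isspace c) = true → s ≠ .between →
    List.foldl rerunStep s u ≠ .between := by
  intro u
  induction u with
  | nil => intro s _ hs; simpa using hs
  | cons c u' ih =>
      intro s hall hs
      have hc : PySem.Chars.isspace c = false := by
        have := List.all_eq_true.mp hall c (by simp)
        simpa using this
      have hall' : u'.all (fun c => !PySem.Chars.isspace c) = true := by
        rw [List.all_eq_true] at hall ⊢
        exact fun a ha => hall a (by simp [ha])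
      rw [List.foldl_cons]
      apply ih _ hall'
      cases s with
      | between => exact absurd rfl hs
      | num1 => simp [rerunStep, hc]; split_ifs <;> simp
      | dash => simp [rerunStep]; split_ifs <;> simp
      | num2 => simp [rerunStep, hc]; split_ifs <;> simp
      | suffix => simp [rerunStep, hc]
      | dead => simp [rerunStep]

lemma pv_nz_between (t : List Char) (ht : t ≠ [])
    (hns : t.all (fun c => !PySem.Chars.isspace c) = true) :
    List.foldl rerunStep .between t ≠ .between := by
  cases t with
  | nil => exact absurd rfl ht
  | cons c u =>
      have hc : PySem.Chars.isspace c = false := by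
        have := List.all_eq_true.mp hns c (by simp); simpa using this
      have hns' : u.all (fun c => !PySem.Chars.isspace c) = true := by
        rw [List.all_eq_true] at hns ⊢; exact fun a ha => hns a (by simp [ha])
      rw [List.foldl_cons]
      apply pv_nz u _ hns'
      by_cases hcd : PySem.Chars.isdigit c = true <;> simp [rerunStep, hc, hcd]

-- ---- token-level lemmas ----

lemma pv_F1 (x y : List Char) (hy : y ≠ []) : pvOk (x ++ '@' :: y) = false := by
  by_cases hall : y.all (· == '@') = true
  · unfold pvOk
    rw [pv_end_allat y x hy hall]
    simp
  · apply pv_ok_of_valid_false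
    have hall' : ¬ (('@' :: y).all (· == '@') = true) := by
      intro h
      rw [List.all_eq_true] at h
      exact hall (List.all_eq_true.mpr (fun a ha => h a (by simp [ha])))
    rw [pv_rs_split x ('@' :: y) hall']
    obtain ⟨v, hv⟩ := pv_rs_head '@' y hall'
    rw [hv]
    exact pv_valid_nondigit_mem _ '@' (by simp) (by decide) (by decide)

lemma pv_digits_no_at {d : List Char} (h : d.all PySem.Chars.isdigit = true) : '@' ∉ d := by
  intro hm
  have := List.all_eq_true.mp h _ hm
  simp [PySem.Chars.isdigit] at this

lemma pv_rs_digits {d : List Char} (h0 : d ≠ []) (h : d.all PySem.Chars.isdigit = true) :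
    pvRstripAt d = d := by
  obtain ⟨z, b, hzb⟩ := (List.eq_nil_or_concat d).resolve_left h0
  rw [List.concat_eq_append] at hzb
  subst hzb
  apply pv_rs_last
  apply pv_digit_ne_at
  exact List.all_eq_true.mp h b (by simp)

lemma pv_T3 : ∀ (u e d : List Char), d ≠ [] → d.all PySem.Chars.isdigit = true →
    e ≠ [] → e.all PySem.Chars.isdigit = true →
    u.all (fun c => !PySem.Chars.isspace c) = true →
    pvOk (d ++ '-' :: (e ++ u)) = pvTokA (List.foldl rerunStep .num2 u) := by
  intro u
  induction u with
  | nil =>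
      intro e d hd0 hd he0 he _
      simp only [List.append_nil, List.foldl_nil]
      have hat : '@' ∉ d ++ '-' :: e := by
        intro hm
        rcases List.mem_append.mp hm with h | h
        · exact pv_digits_no_at hd h
        · rcases List.mem_cons.mp h with h1 | h1
          · exact absurd h1 (by decide)
          · exact pv_digits_no_at he h1
      obtain ⟨z, b, hzb⟩ := (List.eq_nil_or_concat e).resolve_left he0
      rw [List.concat_eq_append] at hzb
      have hb : PySem.Chars.isdigit b = true := by
        apply List.all_eq_true.mp he; rw [hzb]; simp
      have hrs : pvRstripAt (d ++ '-' :: e) = d ++ '-' :: e := by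
        have : d ++ '-' :: e = (d ++ '-' :: z) ++ [b] := by rw [hzb]; simp
        rw [this, pv_rs_last _ b (pv_digit_ne_at hb), ← this]
      unfold pvOk
      rw [pv_end_false_of_not_mem _ hat]
      simp only [Bool.false_eq_true, if_false, hrs]
      rw [pv_valid_range d e hd0 hd]
      simp [PySem.Chars.strIsdigit, he0, he, pvTokA]
  | cons c u' ih =>
      intro e d hd0 hd he0 he hns
      have hc : PySem.Chars.isspace c = false := by
        have := List.all_eq_true.mp hns c (by simp); simpa using this
      have hns' : u'.all (fun c => !PySem.Chars.isspace c) = true := by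
        rw [List.all_eq_true] at hns ⊢; exact fun a ha => hns a (by simp [ha])
      rw [List.foldl_cons]
      by_cases hcd : PySem.Chars.isdigit c = true
      · have hstep : rerunStep .num2 c = .num2 := by simp [rerunStep, hcd]
        rw [hstep]
        have : d ++ '-' :: (e ++ c :: u') = d ++ '-' :: ((e ++ [c]) ++ u') := by simp
        rw [this]
        exact ih (e ++ [c]) d hd0 hd (by simp) (by simp [List.all_append, he, hcd]) hns'
      · by_cases hca : c = '@'
        · subst hca
          have hstep : rerunStep .num2 '@' = .suffix := by decide
          rw [hstep]
          cases u' with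
          | nil =>
              simp only [List.foldl_nil]
              have hw : '@' ∉ d ++ '-' :: e := by
                intro hm
                rcases List.mem_append.mp hm with h | h
                · exact pv_digits_no_at hd h
                · rcases List.mem_cons.mp h with h1 | h1
                  · exact absurd h1 (by decide)
                  · exact pv_digits_no_at he h1
              have hassoc : d ++ '-' :: (e ++ ['@']) = (d ++ '-' :: e) ++ ['@'] := by simp
              rw [hassoc]
              unfold pvOk
              rw [pv_end_concat_false _ hw]
              simp only [Bool.false_eq_true, if_false]
              rw [pv_rs_all _ ['@'] (by decide)]
              obtain ⟨z, b, hzb⟩ := (List.eq_nil_or_concat e).resolve_left he0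
              rw [List.concat_eq_append] at hzb
              have hb : PySem.Chars.isdigit b = true := by
                apply List.all_eq_true.mp he; rw [hzb]; simp
              have hrs : pvRstripAt (d ++ '-' :: e) = d ++ '-' :: e := by
                have h2 : d ++ '-' :: e = (d ++ '-' :: z) ++ [b] := by rw [hzb]; simp
                rw [h2, pv_rs_last _ b (pv_digit_ne_at hb), ← h2]
              rw [hrs, pv_valid_range d e hd0 hd]
              simp [PySem.Chars.strIsdigit, he0, he, pvTokA]
          | cons c'' u'' =>
              have hassoc : d ++ '-' :: (e ++ '@' :: c'' :: u'') = (d ++ '-' :: e) ++ '@' :: (c'' :: u'') := by simp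
              rw [hassoc, pv_F1 _ _ (by simp)]
              have hc'' : PySem.Chars.isspace c'' = false := by
                have := List.all_eq_true.mp hns' c'' (by simp); simpa using this
              rw [List.foldl_cons]
              have : rerunStep .suffix c'' = .dead := by simp [rerunStep, hc'']
              rw [this, pv_dead_absorb]
              rfl
        · have hstep : rerunStep .num2 c = .dead := by
            simp [rerunStep, hcd, hc]
            exact fun h => absurd h hca
          rw [hstep, pv_dead_absorb]
          have hnall : ¬ ((c :: u').all (· == '@') = true) := by
            intro h
            have := List.all_eq_true.mp h c (by simp)
            exact hca (by simpa using this)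
          have hok : pvOk (d ++ '-' :: (e ++ c :: u')) = false := by
            apply pv_ok_of_valid_false
            have hassoc : d ++ '-' :: (e ++ c :: u') = (d ++ '-' :: e) ++ (c :: u') := by simp
            rw [hassoc, pv_rs_split _ _ hnall]
            obtain ⟨v, hv⟩ := pv_rs_head c u' hnall
            rw [hv]
            have : (d ++ '-' :: e) ++ c :: v = d ++ '-' :: (e ++ c :: v) := by simp
            rw [this, pv_valid_range d _ hd0 hd]
            exact pv_strIsdigit_false_of_mem _ c (by simp) (Bool.eq_false_iff.mpr hcd)
          rw [hok]; rfl

lemma pv_T2 (u d : List Char) (hd0 : d ≠ []) (hd : d.all PySem.Chars.isdigit = true)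
    (hns : u.all (fun c => !PySem.Chars.isspace c) = true) :
    pvOk (d ++ '-' :: u) = pvTokA (List.foldl rerunStep .dash u) := by
  cases u with
  | nil =>
      simp only [List.foldl_nil]
      have hok : pvOk (d ++ ['-']) = false := by
        apply pv_ok_of_valid_false
        rw [pv_rs_last d '-' (by decide)]
        rw [pv_valid_range d [] hd0 hd]
        simp [PySem.Chars.strIsdigit]
      rw [hok]; rfl
  | cons c u' =>
      have hc : PySem.Chars.isspace c = false := by
        have := List.all_eq_true.mp hns c (by simp); simpa using this
      have hns' : u'.all (fun c => !PySem.Chars.isspace c) = true := by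
        rw [List.all_eq_true] at hns ⊢; exact fun a ha => hns a (by simp [ha])
      rw [List.foldl_cons]
      by_cases hcd : PySem.Chars.isdigit c = true
      · have hstep : rerunStep .dash c = .num2 := by simp [rerunStep, hcd]
        rw [hstep]
        have : d ++ '-' :: c :: u' = d ++ '-' :: ([c] ++ u') := by simp
        rw [this]
        exact pv_T3 u' [c] d hd0 hd (by simp) (by simp [hcd]) hns'
      · have hstep : rerunStep .dash c = .dead := by simp [rerunStep, hcd]
        rw [hstep, pv_dead_absorb]
        have hnall0 : ¬ (('-' :: c :: u').all (· == '@') = true) := by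
          intro h
          have := List.all_eq_true.mp h '-' (by simp)
          simp at this
        have hok : pvOk (d ++ '-' :: c :: u') = false := by
          apply pv_ok_of_valid_false
          have hassoc : d ++ '-' :: c :: u' = d ++ ('-' :: c :: u') := by simp
          rw [hassoc, pv_rs_split _ _ hnall0]
          by_cases h2 : (c :: u').all (· == '@') = true
          · have : pvRstripAt ('-' :: c :: u') = ['-'] := by
              have h3 : '-' :: c :: u' = ['-'] ++ (c :: u') := by simp
              rw [h3, pv_rs_all _ _ h2]
              decide
            rw [this, pv_valid_range d [] hd0 hd]
            simp [PySem.Chars.strIsdigit]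
          · have h3 : '-' :: c :: u' = ['-'] ++ (c :: u') := by simp
            rw [h3, pv_rs_split _ _ h2]
            obtain ⟨v, hv⟩ := pv_rs_head c u' h2
            rw [hv]
            have : d ++ (['-'] ++ c :: v) = d ++ '-' :: (c :: v) := by simp
            rw [this, pv_valid_range d _ hd0 hd]
            exact pv_strIsdigit_false_of_mem _ c (by simp) (Bool.eq_false_iff.mpr hcd)
        rw [hok]; rfl

lemma pv_T1 : ∀ (u d : List Char), d ≠ [] → d.all PySem.Chars.isdigit = true →
    u.all (fun c => !PySem.Chars.isspace c) = true →
    pvOk (d ++ u) = pvTokA (List.foldl rerunStep .num1 u) := by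
  intro u
  induction u with
  | nil =>
      intro d hd0 hd _
      simp only [List.append_nil, List.foldl_nil]
      unfold pvOk
      rw [pv_end_false_of_not_mem _ (pv_digits_no_at hd)]
      simp only [Bool.false_eq_true, if_false]
      rw [pv_rs_digits hd0 hd, pv_valid_digits d hd0 hd]
      rfl
  | cons c u' ih =>
      intro d hd0 hd hns
      have hc : PySem.Chars.isspace c = false := by
        have := List.all_eq_true.mp hns c (by simp); simpa using this
      have hns' : u'.all (fun c => !PySem.Chars.isspace c) = true := by
        rw [List.all_eq_true] at hns ⊢; exact fun a ha => hns a (by simp [ha])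
      rw [List.foldl_cons]
      by_cases hcd : PySem.Chars.isdigit c = true
      · have hstep : rerunStep .num1 c = .num1 := by simp [rerunStep, hcd]
        rw [hstep]
        have : d ++ c :: u' = (d ++ [c]) ++ u' := by simp
        rw [this]
        exact ih (d ++ [c]) (by simp) (by simp [List.all_append, hd, hcd]) hns'
      · by_cases hcdash : c = '-'
        · subst hcdash
          have hstep : rerunStep .num1 '-' = .dash := by decide
          rw [hstep]
          exact pv_T2 u' d hd0 hd hns'
        · by_cases hca : c = '@'
          · subst hca
            have hstep : rerunStep .num1 '@' = .suffix := by decide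
            rw [hstep]
            cases u' with
            | nil =>
                simp only [List.foldl_nil]
                unfold pvOk
                rw [pv_end_concat_false _ (pv_digits_no_at hd)]
                simp only [Bool.false_eq_true, if_false]
                rw [pv_rs_all _ ['@'] (by decide), pv_rs_digits hd0 hd,
                  pv_valid_digits d hd0 hd]
                rfl
            | cons c'' u'' =>
                rw [pv_F1 _ _ (by simp)]
                have hc'' : PySem.Chars.isspace c'' = false := by
                  have := List.all_eq_true.mp hns' c'' (by simp); simpa using this
                rw [List.foldl_cons]
                have : rerunStep .suffix c'' = .dead := by simp [rerunStep, hc'']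
                rw [this, pv_dead_absorb]
                rfl
          · have hstep : rerunStep .num1 c = .dead := by
              have h1 : (c == '-') = false := by simp [hcdash]
              have h2 : (c == '@') = false := by simp [hca]
              simp [rerunStep, hcd, hc, h1, h2]
            rw [hstep, pv_dead_absorb]
            have hnall : ¬ ((c :: u').all (· == '@') = true) := by
              intro h
              have := List.all_eq_true.mp h c (by simp)
              exact hca (by simpa using this)
            have hok : pvOk (d ++ c :: u') = false := by
              apply pv_ok_of_valid_false
              rw [pv_rs_split _ _ hnall]
              obtain ⟨v, hv⟩ := pv_rs_head c u' hnall
              rw [hv]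
              exact pv_valid_nondigit_mem _ c (by simp) (by simp [hcd]) hcdash
            rw [hok]; rfl

lemma pv_Tok (t : List Char) (ht : t ≠ [])
    (hns : t.all (fun c => !PySem.Chars.isspace c) = true) :
    pvOk t = pvTokA (List.foldl rerunStep .between t) := by
  cases t with
  | nil => exact absurd rfl ht
  | cons c u =>
      have hc : PySem.Chars.isspace c = false := by
        have := List.all_eq_true.mp hns c (by simp); simpa using this
      have hns' : u.all (fun c => !PySem.Chars.isspace c) = true := by
        rw [List.all_eq_true] at hns ⊢; exact fun a ha => hns a (by simp [ha])
      rw [List.foldl_cons]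
      by_cases hcd : PySem.Chars.isdigit c = true
      · have hstep : rerunStep .between c = .num1 := by simp [rerunStep, hc, hcd]
        rw [hstep]
        have : c :: u = [c] ++ u := by simp
        rw [this]
        exact pv_T1 u [c] (by simp) (by simp [hcd]) hns'
      · have hstep : rerunStep .between c = .dead := by simp [rerunStep, hc, hcd]
        rw [hstep, pv_dead_absorb]
        by_cases hall : (c :: u).all (· == '@') = true
        · have hca : c = '@' := by
            have := List.all_eq_true.mp hall c (by simp); simpa using this
          subst hca
          cases u with
          | nil => decide
          | cons c'' u'' =>
              have : '@' :: c'' :: u'' = [] ++ '@' :: (c'' :: u'') := by simp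
              rw [this, pv_F1 _ _ (by simp)]
              rfl
        · have hok : pvOk (c :: u) = false := by
            apply pv_ok_of_valid_false
            obtain ⟨v, hv⟩ := pv_rs_head c u hall
            rw [hv]
            exact pv_valid_headbad c v (by simp [hcd])
          rw [hok]; rfl

-- ---- the main loop invariant ----

lemma pv_G : ∀ (l cur : List Char),
    cur.all (fun c => !PySem.Chars.isspace c) = true →
    (PySem.Chars.split₀.go l cur []).all pvOk =
      rerunAccept (List.foldl rerunStep (List.foldl rerunStep .between cur.reverse) l) := by
  intro l
  induction l with
  | nil =>
      intro cur hcur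
      rw [pv_split_go_nil]
      by_cases hc : cur.isEmpty
      · have : cur = [] := by simpa [List.isEmpty_iff] using hc
        subst this
        simp [rerunAccept]
      · have hcur0 : cur.reverse ≠ [] := by
          simp [List.isEmpty_iff] at hc; simp [hc]
        have hcurns : cur.reverse.all (fun c => !PySem.Chars.isspace c) = true := by
          rw [List.all_eq_true] at hcur ⊢
          exact fun a ha => hcur a (List.mem_reverse.mp ha)
        simp only [hc, Bool.false_eq_true, if_false, List.reverse_nil, List.reverse_cons,
          List.nil_append]
        have htok := pv_Tok cur.reverse hcur0 hcurns
        have hnz := pv_nz_between cur.reverse hcur0 hcurns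
        simp only [List.foldl_nil, List.all_cons, List.all_nil, Bool.and_true]
        rw [htok]
        cases hS : List.foldl rerunStep .between cur.reverse with
        | between => exact absurd hS hnz
        | num1 => rfl
        | dash => rfl
        | num2 => rfl
        | suffix => rfl
        | dead => rfl
  | cons c l' ih =>
      intro cur hcur
      rw [pv_split_go_cons, List.foldl_cons]
      by_cases hs : PySem.Chars.isspace c = true
      · simp only [hs, if_true]
        by_cases hc : cur.isEmpty
        · have : cur = [] := by simpa [List.isEmpty_iff] using hc
          subst this
          have : rerunStep .between c = .between := by simp [rerunStep, hs]
          simp only [List.reverse_nil, List.foldl_nil, this, if_true]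
          exact ih [] (by simp)
        · have hcur0 : cur.reverse ≠ [] := by
            simp [List.isEmpty_iff] at hc; simp [hc]
          have hcurns : cur.reverse.all (fun c => !PySem.Chars.isspace c) = true := by
            rw [List.all_eq_true] at hcur ⊢
            exact fun a ha => hcur a (List.mem_reverse.mp ha)
          simp only [hc, Bool.false_eq_true, if_false]
          rw [pv_split_go_acc l' [] [cur.reverse]]
          simp only [List.reverse_cons, List.reverse_nil, List.nil_append, List.all_append,
            List.all_cons, List.all_nil, Bool.and_true]
          have htok := pv_Tok cur.reverse hcur0 hcurns
          have hnz := pv_nz_between cur.reverse hcur0 hcurns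
          have hsd : (c == '-') = false := by simp [pv_space_ne_dash hs]
          have hsa : (c == '@') = false := by simp [pv_space_ne_at hs]
          rw [htok]
          have hih := ih [] (by simp)
          simp only [List.reverse_nil, List.foldl_nil] at hih
          cases hS : List.foldl rerunStep .between cur.reverse with
          | between => exact absurd hS hnz
          | num1 =>
              have : rerunStep .num1 c = .between := by
                simp [rerunStep, hs, pv_space_not_digit hs, hsd, hsa]
              rw [this, hih]; simp [pvTokA]
          | dash =>
              have : rerunStep .dash c = .dead := by simp [rerunStep, pv_space_not_digit hs]
              rw [this, pv_dead_absorb]; simp [pvTokA, rerunAccept]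
          | num2 =>
              have : rerunStep .num2 c = .between := by
                simp [rerunStep, hs, pv_space_not_digit hs, hsa]
              rw [this, hih]; simp [pvTokA]
          | suffix =>
              have : rerunStep .suffix c = .between := by simp [rerunStep, hs]
              rw [this, hih]; simp [pvTokA]
          | dead =>
              have hdd : rerunStep .dead c = .dead := rfl
              rw [hdd, pv_dead_absorb]; simp [pvTokA, rerunAccept]
      · simp only [hs, Bool.false_eq_true, if_false]
        have hcur' : (c :: cur).all (fun c => !PySem.Chars.isspace c) = true := by
          rw [List.all_eq_true] at hcur ⊢
          intro a ha
          rcases List.mem_cons.mp ha with h | h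
          · subst h; simp [hs]
          · exact hcur a h
        have := ih (c :: cur) hcur'
        rw [this]
        simp [List.foldl_append]

-- ===== VERDICT (by name: the statement is the Claim_ definition above) =====
theorem is_rerun_input_spec : Claim_equal_is_rerun_input := by
  intro user_input _
  unfold Spec_is_rerun_input is_rerun_input is_rerun_input_alt
  cases hcs : user_input.toList.isEmpty
  · simp only [hcs, Bool.false_eq_true, if_false, Bool.not_false, Bool.true_and]
    have hG := pv_G user_input.toList [] (by simp)
    simp only [List.reverse_nil, List.foldl_nil] at hG
    show (PySem.Chars.split₀.go user_input.toList [] []).all pvOk =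
      rerunAccept (List.foldl rerunStep .between user_input.toList)
    exact hG
  · simp [hcs]
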